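-- pv_equiv track=rewrite | github.com/arup-group/genet | genet/use/schedule.py | divide_network_route
-- ===== SOURCE A (Python) =====
-- from typing import List
--
-- def divide_network_route(route: List[str], stops_linkrefids: List[str]) -> List[List[str]]:
--     """
--     Divides into list of lists, the network route traversed by a PT service.
--     E.g.
--     route = ['a-a', 'a-b', 'b-b', 'b-c', 'c-c', 'c-d']
--     stops_linkrefids = ['a-a', 'b-b', 'c-c']
--     For a service with stops A, B, C, where the stops are snapped to network links 'a-a', 'b-b', 'c-c' respectively.
--     This method will give you teh answer:
--     [['a-a', 'a-b', 'b-b'], ['b-b', 'b-c', 'c-c']]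
--     i.e. the route between stops A and B, and B and C, in order.
--     :param route: list of network link IDs (str)
--     :param stops_linkrefids: List of network link IDs (str) that the stops on route are snapped to
--     :return:
--     """
--     divided_route = [[]]
--     for link_id in route:
--         divided_route[-1].append(link_id)
--         while stops_linkrefids and (link_id == stops_linkrefids[0]):
--             divided_route.append([stops_linkrefids[0]])
--             stops_linkrefids = stops_linkrefids[1:]
--     return divided_route[1:-1]
-- ===== SOURCE B (Python) =====
-- from typing import List
--
-- def divide_network_route(route: List[str], stops_linkrefids: List[str]) -> List[List[str]]:
--     # Two-pass: first find the boundary indices where stops match (greedy,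
--     # duplicate-tolerant), then slice the route inclusively between boundaries.
--     positions = []
--     j = 0
--     for i, link in enumerate(route):
--         while j < len(stops_linkrefids) and link == stops_linkrefids[j]:
--             positions.append(i)
--             j += 1
--     return [route[a:b + 1] for a, b in zip(positions, positions[1:])]
-- ===== Notes on version B (the rewrite author's own statement) =====
-- stated objective: alternative
-- what changed: A builds the segments incrementally during one scan (appending to the last segment and opening a new one at each stop match); B first computes the list of boundary indices with a pointer into the stops list, then builds each segment as an inclusive slice route[a:b+1] between adjacent boundaries.
import Mathlib
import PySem

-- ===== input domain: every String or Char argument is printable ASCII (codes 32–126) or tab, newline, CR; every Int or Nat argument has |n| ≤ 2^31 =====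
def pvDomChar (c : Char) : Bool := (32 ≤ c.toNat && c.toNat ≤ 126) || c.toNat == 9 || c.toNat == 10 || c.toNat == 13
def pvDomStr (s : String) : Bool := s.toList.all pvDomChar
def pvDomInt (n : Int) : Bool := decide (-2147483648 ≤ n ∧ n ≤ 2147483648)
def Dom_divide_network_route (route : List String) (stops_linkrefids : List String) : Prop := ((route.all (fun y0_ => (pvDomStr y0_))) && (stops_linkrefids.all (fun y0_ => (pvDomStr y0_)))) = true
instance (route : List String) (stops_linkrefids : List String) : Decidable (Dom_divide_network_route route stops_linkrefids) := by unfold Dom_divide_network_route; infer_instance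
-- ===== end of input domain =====

-- ===== PORT A =====
def pvAppendLast : List (List String) → String → List (List String)
  | [], _ => []
  | [l], x => [l ++ [x]]
  | l :: l' :: ls, x => l :: pvAppendLast (l' :: ls) x

def pvAWhile (link : String) : List (List String) → List String → List (List String) × List String
  | d, [] => (d, [])
  | d, s :: rest =>
      if link == s then pvAWhile link (d ++ [[s]]) rest else (d, s :: rest)

def divide_network_route (route : List String) (stops_linkrefids : List String) : List (List String) :=
  let st := route.foldl (fun st link => pvAWhile link (pvAppendLast st.1 link) st.2)
      ([[]], stops_linkrefids)
  PySem.List.slice st.1 (some 1) (some (-1))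

-- ===== PORT B =====
def pvBWhile (stops : List String) (link : String) (i : Int) (j : Nat) (pos : List Int) : List Int × Nat :=
  if h : j < stops.length then
    if link == stops[j] then pvBWhile stops link i (j + 1) (pos ++ [i]) else (pos, j)
  else (pos, j)
termination_by stops.length - j

def divide_network_route_alt (route : List String) (stops_linkrefids : List String) : List (List String) :=
  let st := (PySem.List.enumerate route 0).foldl
      (fun (st : List Int × Nat) p => pvBWhile stops_linkrefids p.2 p.1 st.2 st.1) ([], 0)
  (st.1.zip st.1.tail).map (fun p => PySem.List.slice route (some p.1) (some (p.2 + 1)))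

-- ===== PRECONDITION & SPEC =====
def Spec_divide_network_route (route : List String) (stops_linkrefids : List String) (out : List (List String)) : Prop := out = divide_network_route_alt route stops_linkrefids
instance (route : List String) (stops_linkrefids : List String) (out : List (List String)) : Decidable (Spec_divide_network_route route stops_linkrefids out) := by unfold Spec_divide_network_route; infer_instance

-- ===== CLAIM (what is proved, stated in full; the proofs are below) =====
def Claim_equal_divide_network_route : Prop := ∀ (route : List String) (stops_linkrefids : List String), Dom_divide_network_route route stops_linkrefids → Spec_divide_network_route route stops_linkrefids (divide_network_route route stops_linkrefids)

-- ===== LEMMAS AND PROOFS =====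

-- seg route a b = route[a:b] for Nat bounds (proof-side description of a segment)
def pvSeg (route : List String) (a b : Nat) : List String := (route.take b).drop a

-- pvShape route a ps i: the segments A's divided_route holds when the matched
-- boundary indices so far are a :: ps and the scan has consumed route[:i]
def pvShape (route : List String) : Nat → List Nat → Nat → List (List String)
  | a, [], i => [pvSeg route a i]
  | a, p :: ps, i => pvSeg route a (p + 1) :: pvShape route p ps i

lemma pvShape_ne_nil (route : List String) (a : Nat) (ps : List Nat) (i : Nat) :
    pvShape route a ps i ≠ [] := by cases ps <;> simp [pvShape]

lemma pvSeg_extend (route : List String) (a i : Nat) (ha : a ≤ i) (hi : i < route.length) :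
    pvSeg route a i ++ [route[i]] = pvSeg route a (i + 1) := by
  unfold pvSeg
  have h1 : route.take (i + 1) = route.take i ++ [route[i]] := by
    rw [List.take_add_one]
    simp [List.getElem?_eq_getElem hi]
  rw [h1, List.drop_append_of_le_length (by simpa [List.length_take] using by omega)]

lemma pvSeg_single (route : List String) (i : Nat) (hi : i < route.length) :
    pvSeg route i (i + 1) = [route[i]] := by
  rw [← pvSeg_extend route i i (le_refl i) hi]
  simp [pvSeg]

lemma pvShape_stable (route : List String) (ps : List Nat) (a i : Nat)
    (h : route.length ≤ i) :
    pvShape route a ps i = pvShape route a ps route.length := by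
  induction ps generalizing a with
  | nil => simp [pvShape, pvSeg, List.take_of_length_le h]
  | cons p ps ih => simp [pvShape, ih]

lemma pvShape_appendLast (route : List String) (i : Nat) (hi : i < route.length) :
    ∀ (ps : List Nat) (a : Nat), a ≤ i → (∀ p ∈ ps, p ≤ i) →
    pvAppendLast (pvShape route a ps i) route[i] = pvShape route a ps (i + 1) := by
  intro ps
  induction ps with
  | nil => intro a ha _; simp [pvShape, pvAppendLast, pvSeg_extend route a i ha hi]
  | cons p ps ih =>
      intro a ha hall
      have hp : p ≤ i := hall p (by simp)
      have hrec := ih p hp (fun q hq => hall q (by simp [hq]))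
      cases h : pvShape route p ps i with
      | nil => exact absurd h (pvShape_ne_nil route p ps i)
      | cons y ys =>
          simp only [pvShape, h, pvAppendLast]
          rw [← h, hrec]

lemma pvShape_append (route : List String) (q k : Nat) :
    ∀ (ps : List Nat) (a : Nat),
    pvShape route a (ps ++ [q]) k = pvShape route a ps (q + 1) ++ [pvSeg route q k] := by
  intro ps
  induction ps with
  | nil => intro a; simp [pvShape]
  | cons p ps ih => intro a; simp [pvShape, ih]

lemma pvGetElem_of_drop {α : Type} (xs : List α) (j : Nat) (s : α) (rest : List α)
    (h : xs.drop j = s :: rest) (hj : j < xs.length) : xs[j] = s := by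
  have h0 : (xs.drop j)[0]? = some s := by simp [h]
  rw [List.getElem?_drop] at h0
  simpa [List.getElem?_eq_getElem hj] using h0

lemma pvWhile_corr (route stops : List String) (i : Nat) (hi : i < route.length) :
    ∀ (srem : List String) (j : Nat) (pos : List Nat),
    stops.drop j = srem → (∀ p ∈ pos, p ≤ i) →
    ∃ (pos' : List Nat) (j' : Nat),
      pvAWhile route[i] (pvShape route 0 pos (i + 1)) srem
          = (pvShape route 0 pos' (i + 1), stops.drop j') ∧
      pvBWhile stops route[i] (i : Int) j (pos.map (fun n : Nat => (n : Int)))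
          = (pos'.map (fun n : Nat => (n : Int)), j') ∧
      (∀ p ∈ pos', p ≤ i) := by
  intro srem
  induction srem with
  | nil =>
      intro j pos hdrop hall
      refine ⟨pos, j, ?_, ?_, hall⟩
      · simp [pvAWhile, hdrop]
      · have hj : ¬ j < stops.length := by
          have := congrArg List.length hdrop; simp at this; omega
        rw [pvBWhile]; simp [hj]
  | cons s rest ih =>
      intro j pos hdrop hall
      have hj : j < stops.length := by
        have := congrArg List.length hdrop; simp at this; omega
      have hsj : stops[j] = s := pvGetElem_of_drop stops j s rest hdrop hj
      have hdrop' : stops.drop (j + 1) = rest := by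
        have h1 : (stops.drop j).drop 1 = rest := by simp [hdrop]
        simpa [List.drop_drop] using h1
      by_cases hc : route[i] = s
      · subst hc
        have hA : pvShape route 0 pos (i + 1) ++ [[route[i]]]
            = pvShape route 0 (pos ++ [i]) (i + 1) := by
          rw [pvShape_append route i (i + 1), pvSeg_single route i hi]
        obtain ⟨pos', j', h1, h2, h3⟩ :=
          ih (j + 1) (pos ++ [i]) hdrop'
            (by intro p hp; rcases List.mem_append.mp hp with h | h
                · exact hall p h
                · simp at h; omega)
        refine ⟨pos', j', ?_, ?_, h3⟩
        · simp only [pvAWhile, beq_self_eq_true, if_true]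
          rw [hA]; exact h1
        · rw [pvBWhile, dif_pos hj, hsj]
          simp only [beq_self_eq_true, if_true]
          simp only [List.map_append, List.map_cons, List.map_nil] at h2
          exact h2
      · refine ⟨pos, j, ?_, ?_, hall⟩
        · rw [show stops.drop j = s :: rest from hdrop]
          simp [pvAWhile, hc]
        · rw [pvBWhile, dif_pos hj, hsj]
          simp [hc]

lemma pvFold_corr (route stops : List String) :
    ∀ (rest : List String) (i : Nat) (pos : List Nat) (j : Nat),
    route.drop i = rest → (∀ p ∈ pos, p ≤ i) →
    ∃ (pos' : List Nat) (j' : Nat),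
      rest.foldl (fun st link => pvAWhile link (pvAppendLast st.1 link) st.2)
          (pvShape route 0 pos i, stops.drop j)
        = (pvShape route 0 pos' route.length, stops.drop j') ∧
      (PySem.List.enumerate rest (i : Int)).foldl
          (fun (st : List Int × Nat) p => pvBWhile stops p.2 p.1 st.2 st.1)
          (pos.map (fun n : Nat => (n : Int)), j)
        = (pos'.map (fun n : Nat => (n : Int)), j') := by
  intro rest
  induction rest with
  | nil =>
      intro i pos j hdrop _
      have hlen : route.length ≤ i := by
        have := congrArg List.length hdrop; simp at this; omega
      exact ⟨pos, j, by simp [pvShape_stable route pos 0 i hlen],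
        by simp [PySem.List.enumerate_nil]⟩
  | cons link rest' ih =>
      intro i pos j hdrop hall
      have hi : i < route.length := by
        have := congrArg List.length hdrop; simp at this; omega
      have hlink : route[i] = link := pvGetElem_of_drop route i link rest' hdrop hi
      have hdrop' : route.drop (i + 1) = rest' := by
        have h1 : (route.drop i).drop 1 = rest' := by simp [hdrop]
        simpa [List.drop_drop] using h1
      obtain ⟨pos1, j1, hA1, hB1, hall1⟩ :=
        pvWhile_corr route stops i hi (stops.drop j) j pos rfl hall
      obtain ⟨pos', j', hA2, hB2⟩ :=
        ih (i + 1) pos1 j1 hdrop' (fun p hp => Nat.le_succ_of_le (hall1 p hp))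
      refine ⟨pos', j', ?_, ?_⟩
      · rw [List.foldl_cons,
          show pvAppendLast (pvShape route 0 pos i) link = pvShape route 0 pos (i + 1) by
            rw [← hlink]; exact pvShape_appendLast route i hi pos 0 (Nat.zero_le i) hall,
          ← hlink, hA1, hA2]
      · rw [hlink] at hB1
        simp only [PySem.List.enumerate_cons, List.foldl_cons]
        rw [hB1, show ((i : Int) + 1) = ((i + 1 : Nat) : Int) by push_cast; ring, hB2]

lemma pvSlice_one_negone (xs : List (List String)) :
    PySem.List.slice xs (some 1) (some (-1)) = (xs.dropLast).drop 1 := by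
  rcases eq_or_ne xs [] with h | h
  · subst h; simp [PySem.List.slice, PySem.List.clampIdx]
  · have hl : 0 < xs.length := List.length_pos_iff.mpr h
    simp [PySem.List.slice, PySem.List.clampIdx, List.dropLast_eq_take, h]
    have h1 : min 1 xs.length = 1 := by omega
    have h2 : ((xs.length : Int) + -1).toNat = xs.length - 1 := by omega
    rw [h1, h2, ← List.drop_one, List.drop_take]

lemma pvShape_dropLast (route : List String) (n : Nat) :
    ∀ (ps : List Nat) (a : Nat),
    (pvShape route a ps n).dropLast
      = ((a :: ps).zip ps).map (fun q => pvSeg route q.1 (q.2 + 1)) := by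
  intro ps
  induction ps with
  | nil => intro a; simp [pvShape]
  | cons p ps ih =>
      intro a
      cases h : pvShape route p ps n with
      | nil => exact absurd h (pvShape_ne_nil route p ps n)
      | cons y ys =>
          simp only [pvShape, h, List.dropLast_cons₂, List.zip_cons_cons, List.map_cons]
          rw [← h, ih p]

lemma pvZipMap (route : List String) :
    ∀ (l l' : List Nat),
    ((l.map (fun n : Nat => (n : Int))).zip (l'.map (fun n : Nat => (n : Int)))).map
        (fun p => PySem.List.slice route (some p.1) (some (p.2 + 1)))
      = (l.zip l').map (fun q => pvSeg route q.1 (q.2 + 1)) := by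
  intro l
  induction l with
  | nil => intro l'; simp
  | cons x xs ih =>
      intro l'
      cases l' with
      | nil => simp
      | cons y ys =>
          simp only [List.map_cons, List.zip_cons_cons]
          rw [ih ys]
          congr 1
          rw [show ((y : Int) + 1) = ((y + 1 : Nat) : Int) by push_cast; ring,
            PySem.List.slice_natCast]
          simp [pvSeg, List.drop_take]

-- ===== VERDICT (by name: the statement is the Claim_ definition above) =====
theorem divide_network_route_spec : Claim_equal_divide_network_route := by
  intro route stops _
  show divide_network_route route stops = divide_network_route_alt route stops
  obtain ⟨pos', j', hA, hB⟩ := pvFold_corr route stops route 0 [] 0 (by simp) (by simp)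
  have e1 : route.foldl (fun st link => pvAWhile link (pvAppendLast st.1 link) st.2)
      ([[]], stops) = (pvShape route 0 pos' route.length, stops.drop j') := by
    have h0 : (pvShape route 0 ([] : List Nat) 0, stops.drop 0) = ([[]], stops) := by
      simp [pvShape, pvSeg]
    rw [← h0]; exact hA
  have e2 : (PySem.List.enumerate route 0).foldl
      (fun (st : List Int × Nat) p => pvBWhile stops p.2 p.1 st.2 st.1) ([], 0)
      = (pos'.map (fun n : Nat => (n : Int)), j') := by
    simp only [Nat.cast_zero, List.map_nil] at hB
    exact hB
  unfold divide_network_route divide_network_route_alt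
  simp only [e1, e2]
  rw [pvSlice_one_negone, pvShape_dropLast route route.length pos' 0]
  cases pos' with
  | nil => simp
  | cons p ps =>
      rw [show ((p :: ps).map (fun n : Nat => (n : Int))).tail = ps.map (fun n : Nat => (n : Int)) from by
          simp,
        pvZipMap route (p :: ps) ps]
      simp only [List.zip_cons_cons, List.map_cons, List.drop_succ_cons, List.drop_zero]
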